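-- pv_equiv track=rewrite | github.com/ayushmangarg2003/LeetCodePython | LeetcodePython/2579.py | coloredCells
-- ===== SOURCE A (Python) =====
-- def coloredCells(n: int) -> int:
--     if n==1:
--         return 1
--     temp = (n-1)*4
--     ans = 1
--     while temp > 0:
--         ans+=temp
--         temp-=4
--     return ans
-- ===== SOURCE B (Python) =====
-- def coloredCells(n: int) -> int:
--     # Closed form: the diamond at minute n has 1 + 4*(1+2+...+(n-1)) = 2*n*(n-1)+1 cells.
--     return 2 * n * (n - 1) + 1
-- ===== Notes on version B (the rewrite author's own statement) =====
-- stated objective: faster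
-- what changed: Replaced the O(n) while-loop summing the arithmetic series 4(n-1)+4(n-2)+... by the closed form 2*n*(n-1)+1.
-- outside the precondition, e.g. on coloredCells(-2): A returns 1, B returns 13
import Mathlib
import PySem

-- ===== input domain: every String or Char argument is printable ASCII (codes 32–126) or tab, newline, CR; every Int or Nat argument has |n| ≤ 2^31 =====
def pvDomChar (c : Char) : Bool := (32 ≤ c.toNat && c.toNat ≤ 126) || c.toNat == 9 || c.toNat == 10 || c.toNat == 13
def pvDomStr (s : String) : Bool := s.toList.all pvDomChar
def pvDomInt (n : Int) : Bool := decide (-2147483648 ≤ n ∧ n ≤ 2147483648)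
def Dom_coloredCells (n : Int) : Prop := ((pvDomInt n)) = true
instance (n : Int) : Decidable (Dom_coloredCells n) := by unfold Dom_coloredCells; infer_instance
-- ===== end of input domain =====

-- B replaces A's O(n) while-loop over the arithmetic series by the closed form 2*n*(n-1)+1 (O(1)).
-- Pre_ restricts to n ≥ 0, the natural domain (minutes count); for n < 0 A's returning 1 is leftover loop state.


-- ===== PORT A =====
-- the while loop: while temp > 0: ans += temp; temp -= 4
def coloredCellsLoop (temp ans : Int) : Int :=
  if h : temp > 0 then coloredCellsLoop (temp - 4) (ans + temp) else ans
termination_by temp.toNat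
decreasing_by
  omega

def coloredCells (n : Int) : Int :=
  if n == 1 then 1
  else coloredCellsLoop ((n - 1) * 4) 1

-- ===== PORT B =====
def coloredCells_alt (n : Int) : Int := 2 * n * (n - 1) + 1

-- ===== PRECONDITION & SPEC =====
-- Pre_ restricts to the function's natural domain n ≥ 0 (minutes); for negative n A returns 1
-- (the loop body never runs), which B does not mirror.
def Pre_coloredCells (n : Int) : Prop := 0 ≤ n
instance (n : Int) : Decidable (Pre_coloredCells n) := by unfold Pre_coloredCells; infer_instance
def pvWitness_coloredCells : Int := (3)
def Spec_coloredCells (n : Int) (out : Int) : Prop := out = coloredCells_alt n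
instance (n : Int) (out : Int) : Decidable (Spec_coloredCells n out) := by unfold Spec_coloredCells; infer_instance

-- ===== CLAIM (what is proved, stated in full; the proofs are below) =====
def Claim_equal_coloredCells : Prop := ∀ (n : Int), Dom_coloredCells n → Pre_coloredCells n → Spec_coloredCells n (coloredCells n)

-- ===== LEMMAS AND PROOFS =====
lemma coloredCellsLoop_mul4 (k : Nat) (ans : Int) :
    coloredCellsLoop (4 * (k : Int)) ans = ans + 2 * k * (k + 1) := by
  induction k generalizing ans with
  | zero => rw [coloredCellsLoop]; simp
  | succ m ih =>
      rw [coloredCellsLoop]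
      have h : (4 : Int) * ((m + 1 : Nat) : Int) > 0 := by positivity
      rw [dif_pos h]
      have e : (4 : Int) * ((m + 1 : Nat) : Int) - 4 = 4 * (m : Int) := by push_cast; ring
      rw [e, ih]
      push_cast; ring

-- ===== VERDICT (by name: the statement is the Claim_ definition above) =====
theorem coloredCells_spec : Claim_equal_coloredCells := by
  intro n _ hn
  replace hn : 0 ≤ n := hn
  unfold Spec_coloredCells coloredCells coloredCells_alt
  by_cases h1 : n = 1
  · simp [h1]
  · rw [if_neg (by simpa using h1)]
    by_cases h0 : n = 0
    · subst h0; rw [coloredCellsLoop]; norm_num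
    · have hn1 : 1 ≤ n - 1 := by omega
      have h : (n - 1) * 4 = 4 * ((n - 1).toNat : Int) := by
        rw [Int.toNat_of_nonneg (by omega)]; ring
      rw [h, coloredCellsLoop_mul4]
      have ht : ((n - 1).toNat : Int) = n - 1 := Int.toNat_of_nonneg (by omega)
      rw [ht]; ring
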